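-- pv_equiv track=rewrite | github.com/lukkasf/Stark_Luka_Sfara | Stark_funciones.py | contador_elementos
-- ===== SOURCE A (Python) =====
-- def no_elementos_repetidos(lista:list):
--     elementos_sin_repetir = []
--     for i in range(len(lista)):
--         elemento = lista[i]
--         repetido = False
--         for j in range(i):
--             if lista[j] == elemento:
--                 repetido = True
--                 break
--         if not repetido:
--              elementos_sin_repetir.append(elemento)
--     return  elementos_sin_repetir
--
-- def contador_elementos(lista: list, posicion: int):
--     unicos = no_elementos_repetidos(lista)
--     elemento_buscar = unicos[posicion]
--     contador = 0
--     for el in lista: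
--         if el == elemento_buscar:
--             contador += 1
--     return contador
-- ===== SOURCE B (Python) =====
-- def contador_elementos(lista: list, posicion: int):
--     # single pass: ordered table of [elemento, contador] pairs
--     pares = []
--     for el in lista:
--         for par in pares:
--             if par[0] == el:
--                 par[1] += 1
--                 break
--         else:
--             pares.append([el, 1])
--     return pares[posicion][1]
-- ===== Notes on version B (the rewrite author's own statement) =====
-- stated objective: alternative
-- what changed: B builds an ordered (element, count) table in one traversal of the list, replacing A's separate quadratic dedup pass followed by a full counting pass; the answer is the counter stored at index posicion.
import Mathlib
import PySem

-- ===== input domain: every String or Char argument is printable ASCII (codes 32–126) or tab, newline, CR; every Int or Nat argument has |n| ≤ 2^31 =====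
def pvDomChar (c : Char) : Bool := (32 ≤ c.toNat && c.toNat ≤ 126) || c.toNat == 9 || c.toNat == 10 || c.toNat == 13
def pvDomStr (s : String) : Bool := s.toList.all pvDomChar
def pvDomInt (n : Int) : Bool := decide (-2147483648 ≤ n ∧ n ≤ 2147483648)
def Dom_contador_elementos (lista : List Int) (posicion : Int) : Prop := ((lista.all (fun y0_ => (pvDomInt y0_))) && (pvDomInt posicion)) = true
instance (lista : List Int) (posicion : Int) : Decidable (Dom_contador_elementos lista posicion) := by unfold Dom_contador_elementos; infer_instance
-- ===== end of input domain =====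

-- B builds an ordered (element, count) table in one pass instead of A's dedup pass plus a separate counting pass.


-- ===== PORT A =====
def no_elementos_repetidos (lista : List Int) : List Int :=
  (PySem.List.pyRange 0 (lista.length : Int)).foldl
    (fun elementos_sin_repetir i =>
      let elemento := PySem.List.pyGetD lista i 0
      let repetido := (PySem.List.pyRange 0 i).any
        (fun j => PySem.List.pyGetD lista j 0 == elemento)
      if repetido then elementos_sin_repetir else elementos_sin_repetir ++ [elemento]) []

def contador_elementos (lista : List Int) (posicion : Int) : Int :=
  let unicos := no_elementos_repetidos lista
  let elemento_buscar := PySem.List.pyGetD unicos posicion 0   -- total under Pre_ (InRange)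
  lista.foldl (fun contador el => if el == elemento_buscar then contador + 1 else contador) 0

-- ===== PORT B =====
-- the inner 'for par in pares: … break / else append': first matching pair is bumped, else append
def incrementa (pares : List (Int × Int)) (el : Int) : List (Int × Int) :=
  match pares with
  | [] => [(el, 1)]
  | (k, c) :: resto => if k == el then (k, c + 1) :: resto else (k, c) :: incrementa resto el

def contador_elementos_alt (lista : List Int) (posicion : Int) : Int :=
  let pares := lista.foldl incrementa []
  (PySem.List.pyGetD pares posicion (0, 0)).2   -- total under Pre_ (InRange)

-- ===== PRECONDITION & SPEC =====
-- Pre_ excludes exactly the inputs where A raises IndexError: posicion out of range of the list of first-unique elements.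
def Pre_contador_elementos (lista : List Int) (posicion : Int) : Prop :=
  PySem.Raise.InRange (PySem.List.dedup lista).length posicion
instance (lista : List Int) (posicion : Int) : Decidable (Pre_contador_elementos lista posicion) := by
  unfold Pre_contador_elementos PySem.Raise.InRange; infer_instance

def pvWitness_contador_elementos : List Int × Int := ([1, 2, 1], 0)

def Spec_contador_elementos (lista : List Int) (posicion : Int) (out : Int) : Prop := out = contador_elementos_alt lista posicion
instance (lista : List Int) (posicion : Int) (out : Int) : Decidable (Spec_contador_elementos lista posicion out) := by unfold Spec_contador_elementos; infer_instance

-- ===== CLAIM (what is proved, stated in full; the proofs are below) =====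
def Claim_equal_contador_elementos : Prop := ∀ (lista : List Int) (posicion : Int), Dom_contador_elementos lista posicion → Pre_contador_elementos lista posicion → Spec_contador_elementos lista posicion (contador_elementos lista posicion)

-- ===== LEMMAS AND PROOFS =====

-- the first n positions of lista, read as A's index loop reads them
lemma take_eq_map_range (lista : List Int) (i : Nat) (h : i ≤ lista.length) :
    (List.range i).map (fun j => lista.getD j 0) = lista.take i := by
  apply List.ext_getElem
  · simp [h]
  · intro k hk1 hk2
    simp only [List.getElem_map, List.getElem_range, List.getElem_take]
    have hkl : k < lista.length := by
      simp only [List.length_map, List.length_range] at hk1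
      omega
    exact List.getD_eq_getElem lista 0 hkl

-- A's 'repetido' test over the processed prefix is membership in the dedup built so far
lemma any_eq_contains_dedup (t : List Int) (el : Int) :
    (t.any (fun x => x == el)) = (PySem.List.dedup t).contains el := by
  rw [Bool.eq_iff_iff]
  simp [List.any_eq_true, beq_iff_eq]

-- PySem.Set.add, with its membership test written as a Prop
lemma set_add_mem (s : List Int) (x : Int) :
    PySem.Set.add s x = if x ∈ s then s else s ++ [x] := by
  rw [PySem.Set.add, PySem.Set.contains]
  by_cases h : x ∈ s <;> simp [h]

-- A's whole dedup pass computes PySem.List.dedup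
lemma noRep_eq_dedup (lista : List Int) :
    no_elementos_repetidos lista = PySem.List.dedup lista := by
  unfold no_elementos_repetidos
  simp only [PySem.List.pyRange_zero_natCast, List.foldl_map, List.any_map,
    Function.comp_def, PySem.List.pyGetD_natCast]
  have key : ∀ n, n ≤ lista.length →
      (List.range n).foldl
        (fun acc (k : Nat) =>
          if (List.range k).any (fun j => lista.getD j 0 == lista.getD k 0) then acc
          else acc ++ [lista.getD k 0]) [] = PySem.List.dedup (lista.take n) := by
    intro n hn
    induction n with
    | zero => simp [PySem.List.dedup]
    | succ m ih =>
      rw [List.range_succ, List.foldl_append, ih (by omega)]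
      have hm : m < lista.length := by omega
      have htake : lista.take (m + 1) = lista.take m ++ [lista[m]] := by
        rw [List.take_add_one]
        simp [List.getElem?_eq_getElem hm]
      have hrange : (List.range m).map (fun j => lista.getD j 0) = lista.take m :=
        take_eq_map_range lista m (by omega)
      have hany : (List.range m).any (fun j => lista.getD j 0 == lista.getD m 0)
          = (PySem.List.dedup (lista.take m)).contains (lista.getD m 0) := by
        rw [← any_eq_contains_dedup]
        rw [← hrange, List.any_map]
        rfl
      have hgd : lista.getD m 0 = lista[m] := List.getD_eq_getElem lista 0 hm
      simp only [List.foldl_cons, List.foldl_nil, hany]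
      rw [hgd, htake]
      have hdd : PySem.List.dedup (List.take m lista ++ [lista[m]])
          = PySem.Set.add (PySem.List.dedup (List.take m lista)) lista[m] := by
        rw [PySem.List.dedup_eq_ofList, PySem.List.dedup_eq_ofList,
          PySem.Set.ofList, PySem.Set.ofList, List.foldl_append]
        simp only [List.foldl_cons, List.foldl_nil]
      rw [hdd, set_add_mem]
      simp only [List.contains_iff_mem]
  rw [key lista.length le_rfl, List.take_length]

-- B's bump step on a table whose keys are nodup, tabulated by f
lemma incrementa_map (u : List Int) (f : Int → Int) (x : Int) (hu : u.Nodup) :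
    incrementa (u.map fun e => (e, f e)) x =
      if x ∈ u then u.map (fun e => (e, if e = x then f e + 1 else f e))
      else (u.map fun e => (e, f e)) ++ [(x, 1)] := by
  induction u with
  | nil => simp [incrementa]
  | cons k u' ih =>
    rcases List.nodup_cons.mp hu with ⟨hk, hu'⟩
    simp only [List.map_cons, incrementa]
    by_cases hkx : k = x
    · subst hkx
      simp only [beq_self_eq_true, if_true, List.mem_cons, true_or]
      congr 1
      apply List.map_congr_left
      intro e he
      have : e ≠ k := by rintro rfl; exact hk he
      simp [this]
    · rw [if_neg (by simpa using hkx), ih hu']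
      by_cases hx : x ∈ u'
      · simp [hx, hkx, Ne.symm hkx]
      · simp only [hx, if_false, List.mem_cons, or_false]
        rw [if_neg (fun h => hkx h.symm)]
        simp

-- the running table after processing p is the dedup of p paired with counts in p
lemma foldl_incrementa (xs : List Int) : ∀ (p : List Int),
    xs.foldl incrementa ((PySem.List.dedup p).map fun e => (e, (p.count e : Int)))
      = (PySem.List.dedup (p ++ xs)).map fun e => (e, ((p ++ xs).count e : Int)) := by
  induction xs with
  | nil => intro p; simp
  | cons x xs ih =>
    intro p
    have step : incrementa ((PySem.List.dedup p).map fun e => (e, (p.count e : Int))) x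
        = (PySem.List.dedup (p ++ [x])).map fun e => (e, ((p ++ [x]).count e : Int)) := by
      rw [incrementa_map _ _ _ (PySem.List.nodup_dedup p)]
      have hded : PySem.List.dedup (p ++ [x])
          = if x ∈ PySem.List.dedup p then PySem.List.dedup p
            else PySem.List.dedup p ++ [x] := by
        rw [PySem.List.dedup_eq_ofList, PySem.List.dedup_eq_ofList, PySem.Set.ofList,
          PySem.Set.ofList, List.foldl_append]
        simp only [List.foldl_cons, List.foldl_nil]
        exact set_add_mem _ _
      by_cases hx : x ∈ PySem.List.dedup p
      · rw [if_pos hx, hded, if_pos hx]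
        apply List.map_congr_left
        intro e _
        by_cases hex : e = x
        · simp [hex, List.count_append]
        · simp [List.count_append, hex, Ne.symm hex]
      · rw [if_neg hx, hded, if_neg hx]
        rw [List.map_append]
        congr 1
        · apply List.map_congr_left
          intro e he
          have hex : e ≠ x := by rintro rfl; exact hx he
          simp [List.count_append, Ne.symm hex]
        · have hxp : x ∉ p := fun h => hx ((PySem.List.mem_dedup p x).mpr h)
          simp [List.count_append, List.count_eq_zero.mpr hxp]
    rw [List.foldl_cons, step, ih (p ++ [x]), List.append_assoc]
    rfl

-- ===== VERDICT (by name: the statement is the Claim_ definition above) =====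
theorem contador_elementos_spec : Claim_equal_contador_elementos := by
  intro lista posicion _ hpre
  unfold Pre_contador_elementos at hpre
  show contador_elementos lista posicion = contador_elementos_alt lista posicion
  unfold contador_elementos contador_elementos_alt
  simp only [noRep_eq_dedup]
  have htab : lista.foldl incrementa []
      = (PySem.List.dedup lista).map fun e => (e, (lista.count e : Int)) := by
    have := foldl_incrementa lista []
    simpa [PySem.List.dedup, PySem.Set.ofList, PySem.Set.empty] using this
  rw [htab]
  set u := PySem.List.dedup lista with hu
  -- the index is in range, so pyGet? returns some
  obtain ⟨x, hx⟩ : ∃ x, PySem.List.pyGet? u posicion = some x := by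
    cases h : PySem.List.pyGet? u posicion with
    | none => exact absurd hpre ((PySem.List.pyGet?_eq_none_iff u posicion).mp h)
    | some x => exact ⟨x, rfl⟩
  have hgetu : PySem.List.pyGetD u posicion 0 = x := by
    simp [PySem.List.pyGetD, hx]
  have hmap := PySem.List.pyGetD_map (fun e => (e, (lista.count e : Int))) u posicion 0
  rw [hgetu] at hmap
  have hsome : ∃ y, PySem.List.pyGet? (u.map fun e => (e, (lista.count e : Int))) posicion = some y := by
    cases h : PySem.List.pyGet? (u.map fun e => (e, (lista.count e : Int))) posicion with
    | none =>
      rw [PySem.List.pyGet?_eq_none_iff] at h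
      rw [List.length_map] at h
      exact absurd hpre h
    | some y => exact ⟨y, rfl⟩
  obtain ⟨y, hy⟩ := hsome
  have hy1 : PySem.List.pyGetD (u.map fun e => (e, (lista.count e : Int))) posicion (0, (lista.count 0 : Int)) = y := by
    simp [PySem.List.pyGetD, hy]
  have hy2 : PySem.List.pyGetD (u.map fun e => (e, (lista.count e : Int))) posicion (0, 0) = y := by
    simp [PySem.List.pyGetD, hy]
  rw [hy2, ← hy1, hmap, hgetu]
  rw [PySem.List.foldl_beq_add_one]
  simp
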